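-- pv_equiv track=rewrite | github.com/liupengsay/PyIsTheBestLang | src/basis/hash/problem.py | lc_2025
-- ===== SOURCE A (Python) =====
-- from collections import defaultdict, Counter
-- from itertools import accumulate
-- from typing import List
--
-- def lc_2025(nums: List[int], k: int) -> int:
--     """
--     url: https://leetcode.cn/problems/maximum-number-of-ways-to-partition-an-array/description/
--     tag: hash|contribution_method|counter
--     """
--     n = len(nums)
--     ans = 0
--     pre = list(accumulate(nums, initial=0))
--     for i in range(1, n):
--         if pre[i] == pre[-1] - pre[i]:
--             ans += 1
--
--     cnt = [0] * n
--     dct = defaultdict(int)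
--     for i in range(n - 2, -1, -1):
--         b = pre[-1] - pre[i + 1]
--         a = pre[i + 1]
--         dct[a - b] += 1
--         cnt[i] += dct[nums[i] - k]
--
--     dct = defaultdict(int)
--     for i in range(1, n):
--         b = pre[-1] - pre[i]
--         a = pre[i]
--         dct[a - b] += 1
--         cnt[i] += dct[k - nums[i]]
--
--     return max(ans, max(cnt))
-- ===== SOURCE B (Python) =====
-- from typing import List
--
-- def lc_2025(nums: List[int], k: int) -> int:
--     # Simpler direct formulation: build the list of split keys 2*pre[p]-total
--     # (p = 1..n-1); a split p stays valid after replacing nums[i] by k iff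
--     # its key equals nums[i]-k (p > i) or k-nums[i] (p <= i).
--     n = len(nums)
--     total = sum(nums)
--     keys = []
--     run = 0
--     for x in nums[:-1]:
--         run += x
--         keys.append(2 * run - total)
--     best = max(keys[i:].count(nums[i] - k) + keys[:i].count(k - nums[i])
--                for i in range(n))
--     return max(keys.count(0), best)
-- ===== Notes on version B (the rewrite author's own statement) =====
-- stated objective: simpler
-- what changed: A fills a cnt array through three passes with two hash counters (a baseline pivot loop, a backward defaultdict pass for splits right of i, a forward defaultdict pass for splits left of i); B builds the list of split keys 2*pre[p]-total once and computes each index's answer directly as keys[i:].count(nums[i]-k) + keys[:i].count(k-nums[i]).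
-- outside the precondition, e.g. on lc_2025([], 0): A raises ValueError, B raises ValueError
import Mathlib
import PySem

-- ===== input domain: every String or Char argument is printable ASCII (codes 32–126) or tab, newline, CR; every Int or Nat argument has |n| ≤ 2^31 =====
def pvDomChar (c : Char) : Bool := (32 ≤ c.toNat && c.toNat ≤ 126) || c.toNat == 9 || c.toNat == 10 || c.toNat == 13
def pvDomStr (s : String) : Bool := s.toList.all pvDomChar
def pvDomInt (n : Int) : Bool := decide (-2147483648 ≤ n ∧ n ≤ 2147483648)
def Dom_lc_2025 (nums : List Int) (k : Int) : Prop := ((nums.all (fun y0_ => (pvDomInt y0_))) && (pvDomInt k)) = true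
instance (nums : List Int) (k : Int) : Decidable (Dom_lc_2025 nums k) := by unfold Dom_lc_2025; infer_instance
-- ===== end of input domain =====

-- B replaces A's three hash-counter loops by one direct count formula per index over
-- the list of split keys (objective: simpler; not faster — B is quadratic).

-- B replaces A's three hash-counter passes (baseline loop + backward dict pass + forward
-- dict pass into a cnt array) by one direct per-index count formula over the list of split
-- keys (objective: simpler; note: B is quadratic, not faster).

-- ===== PORT A =====
-- loop body of A's first cnt loop ('for i in range(n-2,-1,-1)'); Python's defaultdict read
-- 'dct[nums[i]-k]' inserts a 0 entry, which is value-invisible here (every read defaults to 0)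
def lc2025Body1 (pre : List Int) (total k : Int) (nums : List Int)
    (s : List Int × PySem.Dict Int Int) (i : Int) : List Int × PySem.Dict Int Int :=
  let b := total - PySem.List.pyGetD pre (i+1) 0
  let a := PySem.List.pyGetD pre (i+1) 0
  let d := s.2.modify (a - b) 0 (· + 1)
  (PySem.List.pySetD s.1 i (PySem.List.pyGetD s.1 i 0 + d.getD (PySem.List.pyGetD nums i 0 - k) 0), d)

-- loop body of A's second cnt loop ('for i in range(1,n)')
def lc2025Body2 (pre : List Int) (total k : Int) (nums : List Int)
    (s : List Int × PySem.Dict Int Int) (i : Int) : List Int × PySem.Dict Int Int :=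
  let b := total - PySem.List.pyGetD pre i 0
  let a := PySem.List.pyGetD pre i 0
  let d := s.2.modify (a - b) 0 (· + 1)
  (PySem.List.pySetD s.1 i (PySem.List.pyGetD s.1 i 0 + d.getD (k - PySem.List.pyGetD nums i 0) 0), d)

def lc_2025 (nums : List Int) (k : Int) : Int :=
  let n : Nat := nums.length
  let pre : List Int := nums.scanl (· + ·) 0
  let total : Int := PySem.List.pyGetD pre (-1) 0
  let ans : Int := (PySem.List.pyRange 1 (n : Int) 1).foldl
    (fun a i => if PySem.List.pyGetD pre i 0 = total - PySem.List.pyGetD pre i 0 then a + 1 else a) 0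
  let cnt : List Int := List.replicate n 0
  let s1 := (PySem.List.pyRange ((n : Int) - 2) (-1) (-1)).foldl (lc2025Body1 pre total k nums) (cnt, PySem.Dict.empty)
  let s2 := (PySem.List.pyRange 1 (n : Int) 1).foldl (lc2025Body2 pre total k nums) (s1.1, PySem.Dict.empty)
  match PySem.List.max? s2.1 (fun y => y) with
  | some m => max ans m
  | none => 0

-- ===== PORT B =====
def lc_2025_alt (nums : List Int) (k : Int) : Int :=
  let n : Nat := nums.length
  let total : Int := nums.sum
  let keys : List Int := ((PySem.List.slice nums none (some (-1))).foldl
    (fun (s : Int × List Int) x => (s.1 + x, s.2 ++ [2 * (s.1 + x) - total])) (0, [])).2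
  let contribs : List Int := (PySem.List.pyRange 0 (n : Int) 1).map (fun i =>
      ((PySem.List.slice keys (some i) none).count (PySem.List.pyGetD nums i 0 - k) : Int)
    + ((PySem.List.slice keys none (some i)).count (k - PySem.List.pyGetD nums i 0) : Int))
  match PySem.List.max? contribs (fun y => y) with
  | some b => max ((keys.count 0 : Nat) : Int) b
  | none => 0

-- ===== PRECONDITION & SPEC =====
-- Pre_ excludes only nums = [], on which Python A raises ValueError (max() of an empty sequence);
-- B raises the same ValueError there.
def Pre_lc_2025 (nums : List Int) (k : Int) : Prop := nums ≠ []
instance (nums : List Int) (k : Int) : Decidable (Pre_lc_2025 nums k) := by unfold Pre_lc_2025; infer_instance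
def pvWitness_lc_2025 : List Int × Int := ([1, -1, 2, 0, 2], 3)

def Spec_lc_2025 (nums : List Int) (k : Int) (out : Int) : Prop := out = lc_2025_alt nums k
instance (nums : List Int) (k : Int) (out : Int) : Decidable (Spec_lc_2025 nums k out) := by unfold Spec_lc_2025; infer_instance

-- ===== CLAIM (what is proved, stated in full; the proofs are below) =====
def Claim_equal_lc_2025 : Prop := ∀ (nums : List Int) (k : Int), Dom_lc_2025 nums k → Pre_lc_2025 nums k → Spec_lc_2025 nums k (lc_2025 nums k)

-- ===== LEMMAS AND PROOFS =====

-- the key of split position p (1 ≤ p ≤ n-1): 2*pre[p] - total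
def lcKeyF (nums : List Int) (p : Nat) : Int := 2 * (nums.take p).sum - nums.sum
def lcKeys (nums : List Int) : List Int := (List.range (nums.length - 1)).map (fun j => lcKeyF nums (j+1))

-- lcContrib nums k j = number of valid splits after replacing nums[j] by k
def lcContrib (nums : List Int) (k : Int) (j : Nat) : Int :=
  (((lcKeys nums).drop j).count (nums.getD j 0 - k) : Int)
  + (((lcKeys nums).take j).count (k - nums.getD j 0) : Int)

theorem lc_scanl_getD (l : List Int) : ∀ (i : Nat) (a : Int), i ≤ l.length →
    (l.scanl (· + ·) a).getD i 0 = a + (l.take i).sum := by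
  induction l with
  | nil => intro i a h; simp at h; simp [h, List.scanl_nil]
  | cons x xs ih =>
    intro i a h
    cases i with
    | zero => simp [List.scanl_cons]
    | succ j =>
      rw [List.scanl_cons]
      simp only [List.getD, List.getElem?_cons_succ, List.take_succ_cons, List.sum_cons]
      have := ih j (a + x) (by simpa using h)
      simp only [List.getD] at this
      rw [this]; ring

theorem lc_pre_total (nums : List Int) :
    PySem.List.pyGetD (nums.scanl (· + ·) 0) (-1) 0 = nums.sum := by
  have hne : nums.scanl (· + ·) 0 ≠ [] := by
    cases nums <;> simp [List.scanl_cons]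
  rw [PySem.List.pyGetD_neg_one _ _ hne, List.getLast_eq_getElem]
  have hlen : (nums.scanl (· + ·) 0).length = nums.length + 1 := List.length_scanl ..
  have := lc_scanl_getD nums nums.length 0 (le_refl _)
  rw [List.getD_eq_getElem _ _ (by omega)] at this
  simpa [hlen] using this

theorem lc_foldkeys (l : List Int) : ∀ (total run : Int) (acc : List Int),
    (l.foldl (fun (s : Int × List Int) x => (s.1 + x, s.2 ++ [2 * (s.1 + x) - total])) (run, acc)).2
    = acc ++ (List.range l.length).map (fun j => 2 * (run + (l.take (j+1)).sum) - total) := by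
  induction l with
  | nil => intro total run acc; simp
  | cons x xs ih =>
    intro total run acc
    rw [List.foldl_cons, ih]
    simp only [List.length_cons, List.range_succ_eq_map, List.map_cons, List.map_map]
    simp [List.append_assoc, Function.comp_def, add_assoc]

theorem lc_keysB (nums : List Int) :
    ((PySem.List.slice nums none (some (-1))).foldl
      (fun (s : Int × List Int) x => (s.1 + x, s.2 ++ [2 * (s.1 + x) - nums.sum])) (0, [])).2
    = lcKeys nums := by
  rw [PySem.List.slice_to_neg_one, lc_foldkeys]
  unfold lcKeys
  rw [List.length_dropLast]
  simp only [List.nil_append]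
  apply List.map_congr_left
  intro j hj
  simp only [List.mem_range] at hj
  unfold lcKeyF
  rw [List.dropLast_eq_take, List.take_take]
  have : min (j+1) (nums.length - 1) = j + 1 := by omega
  rw [this]
  ring

theorem lc_range_down (n : Nat) :
    PySem.List.pyRange ((n : Int) - 2) (-1) (-1) = (List.range (n-1)).reverse.map (fun j : Nat => (j : Int)) := by
  rw [PySem.List.pyRange_neg_one, List.map_reverse]
  have h : (((n : Int) - 2) - (-1)).toNat = n - 1 := by omega
  rw [h]
  apply List.ext_getElem
  · simp
  · intro i h1 h2
    simp only [List.length_map, List.length_range] at h1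
    rw [List.getElem_reverse]
    simp only [List.getElem_map, List.getElem_range, List.length_map, List.length_range]
    omega

theorem lc_range_up (n : Nat) :
    PySem.List.pyRange 1 (n : Int) 1 = (List.range (n-1)).map (fun j : Nat => ((0 + j + 1 : Nat) : Int)) := by
  rw [PySem.List.pyRange_one]
  have h : ((n : Int) - 1).toNat = n - 1 := by omega
  rw [h]
  apply List.map_congr_left
  intro j hj
  push_cast
  ring

theorem lc_ansA (nums : List Int) :
    (PySem.List.pyRange 1 (nums.length : Int) 1).foldl
      (fun a i => if PySem.List.pyGetD (nums.scanl (· + ·) 0) i 0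
          = nums.sum - PySem.List.pyGetD (nums.scanl (· + ·) 0) i 0 then a + 1 else a) 0
    = ((lcKeys nums).count 0 : Int) := by
  rw [lc_range_up, List.foldl_map]
  have hbody : ∀ (a : Int), ∀ j ∈ List.range (nums.length - 1),
      (if PySem.List.pyGetD (nums.scanl (· + ·) 0) ((0 + j + 1 : Nat) : Int) 0
          = nums.sum - PySem.List.pyGetD (nums.scanl (· + ·) 0) ((0 + j + 1 : Nat) : Int) 0 then a + 1 else a)
      = (if lcKeyF nums (j+1) = 0 then a + 1 else a) := by
    intro a j hj
    simp only [List.mem_range] at hj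
    rw [PySem.List.pyGetD_natCast, lc_scanl_getD nums (0+j+1) 0 (by omega)]
    refine if_congr ?_ rfl rfl
    unfold lcKeyF
    rw [Nat.zero_add]
    constructor <;> intro h <;> omega
  rw [PySem.List.foldl_congr_mem _ _ _ 0 hbody, PySem.List.foldl_ite_add_one]
  unfold lcKeys
  rw [List.count_eq_countP, List.countP_map]
  norm_num
  apply List.countP_congr
  intro j hj
  simp

theorem lc_getD_set (l : List Int) (i j : Nat) (v : Int) (h : i < l.length) :
    (l.set i v).getD j 0 = if i = j then v else l.getD j 0 := by
  simp only [List.getD, List.getElem?_set]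
  by_cases hij : i = j
  · subst hij; simp [h]
  · simp [hij]

theorem lc_getElem_keys (nums : List Int) (m : Nat) (h : m < nums.length - 1) :
    (lcKeys nums)[m]'(by simp [lcKeys]; omega) = lcKeyF nums (m+1) := by
  simp [lcKeys]

theorem lc_len_keys (nums : List Int) : (lcKeys nums).length = nums.length - 1 := by
  simp [lcKeys]

theorem lc_loop1 (nums : List Int) (k : Int) : ∀ (m : Nat), m ≤ nums.length - 1 →
    ∀ (cnt : List Int) (d : PySem.Dict Int Int), cnt.length = nums.length →
    (∀ v, d.getD v 0 = (((lcKeys nums).drop m).count v : Int)) →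
    (((List.range m).reverse.map (fun j : Nat => (j : Int))).foldl
        (lc2025Body1 (nums.scanl (· + ·) 0) nums.sum k nums) (cnt, d)).1.length = nums.length ∧
    ∀ j, j < nums.length →
      (((List.range m).reverse.map (fun j : Nat => (j : Int))).foldl
          (lc2025Body1 (nums.scanl (· + ·) 0) nums.sum k nums) (cnt, d)).1.getD j 0
      = if j < m then cnt.getD j 0 + (((lcKeys nums).drop j).count (nums.getD j 0 - k) : Int)
        else cnt.getD j 0 := by
  intro m
  induction m with
  | zero => intro _ cnt d hlen hd; simp [hlen]
  | succ m ih =>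
    intro hm cnt d hlen hd
    have hm' : m < nums.length - 1 := by omega
    -- unfold one step: range (m+1) reversed starts with m
    have hlist : ((List.range (m+1)).reverse.map (fun j : Nat => (j : Int)))
        = ((m : Nat) : Int) :: ((List.range m).reverse.map (fun j : Nat => (j : Int))) := by
      rw [List.range_succ, List.reverse_append]; simp
    rw [hlist, List.foldl_cons]
    -- evaluate the step
    have hpre : PySem.List.pyGetD (nums.scanl (· + ·) 0) (((m : Nat) : Int) + 1) 0
        = (nums.take (m+1)).sum := by
      have : (((m : Nat) : Int) + 1) = (((m+1 : Nat) : Nat) : Int) := by push_cast; ring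
      rw [this, PySem.List.pyGetD_natCast, lc_scanl_getD nums (m+1) 0 (by omega)]
      ring
    have hkey : (nums.take (m+1)).sum - (nums.sum - (nums.take (m+1)).sum) = lcKeyF nums (m+1) := by
      unfold lcKeyF; ring
    have hdrop : (lcKeys nums).drop m = lcKeyF nums (m+1) :: (lcKeys nums).drop (m+1) := by
      rw [List.drop_eq_getElem_cons (by rw [lc_len_keys]; omega)]
      rw [lc_getElem_keys nums m hm']
    set d' := d.modify (lcKeyF nums (m+1)) 0 (· + 1) with hd'def
    have hd' : ∀ v, d'.getD v 0 = (((lcKeys nums).drop (m+1)).count v : Int) + (if lcKeyF nums (m+1) = v then 1 else 0) := by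
      intro v
      rw [hd'def, PySem.Dict.getD_modify]
      by_cases hv : v = lcKeyF nums (m+1)
      · subst hv; simp [hd]
      · rw [if_neg hv, hd v, if_neg (show ¬ lcKeyF nums (m+1) = v from fun h => hv h.symm)]
        simp
    have hd'2 : ∀ v, d'.getD v 0 = (((lcKeys nums).drop m).count v : Int) := by
      intro v
      rw [hd' v, hdrop, List.count_cons]
      by_cases hv : lcKeyF nums (m+1) = v <;> simp [hv]
    have hstep : lc2025Body1 (nums.scanl (· + ·) 0) nums.sum k nums (cnt, d) ((m : Nat) : Int)
        = (cnt.set m (cnt.getD m 0 + (((lcKeys nums).drop m).count (nums.getD m 0 - k) : Int)), d') := by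
      simp only [lc2025Body1, hpre, hkey]
      simp only [PySem.List.pySetD_natCast, PySem.List.pyGetD_natCast]
      rw [hd'2]
    rw [hstep]
    set cnt' := cnt.set m (cnt.getD m 0 + (((lcKeys nums).drop m).count (nums.getD m 0 - k) : Int)) with hc'
    have hlen' : cnt'.length = nums.length := by rw [hc', List.length_set, hlen]
    obtain ⟨rl, rg⟩ := ih (by omega) cnt' d' hlen' hd'2
    refine ⟨rl, ?_⟩
    intro j hj
    rw [rg j hj]
    have hmlt : m < cnt.length := by omega
    by_cases h1 : j < m
    · rw [if_pos h1, if_pos (by omega : j < m + 1), hc', lc_getD_set _ _ _ _ hmlt,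
        if_neg (by omega : ¬ m = j)]
    · by_cases h2 : j = m
      · subst h2
        rw [if_neg h1, if_pos (by omega : j < j + 1), hc', lc_getD_set _ _ _ _ hmlt, if_pos rfl]
      · rw [if_neg h1, if_neg (by omega : ¬ j < m + 1), hc', lc_getD_set _ _ _ _ hmlt,
          if_neg (by omega : ¬ m = j)]

theorem lc_loop2 (nums : List Int) (k : Int) : ∀ (m : Nat), ∀ (t : Nat), t + m = nums.length - 1 →
    ∀ (cnt : List Int) (d : PySem.Dict Int Int), cnt.length = nums.length →
    (∀ v, d.getD v 0 = (((lcKeys nums).take t).count v : Int)) →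
    (((List.range m).map (fun j : Nat => ((t + j + 1 : Nat) : Int))).foldl
        (lc2025Body2 (nums.scanl (· + ·) 0) nums.sum k nums) (cnt, d)).1.length = nums.length ∧
    ∀ j, j < nums.length →
      (((List.range m).map (fun j : Nat => ((t + j + 1 : Nat) : Int))).foldl
          (lc2025Body2 (nums.scanl (· + ·) 0) nums.sum k nums) (cnt, d)).1.getD j 0
      = if t < j then cnt.getD j 0 + (((lcKeys nums).take j).count (k - nums.getD j 0) : Int)
        else cnt.getD j 0 := by
  intro m
  induction m with
  | zero =>
    intro t ht cnt d hlen hd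
    refine ⟨by simpa using hlen, ?_⟩
    intro j hj
    have : ¬ t < j := by omega
    simp [this]
  | succ m ih =>
    intro t ht cnt d hlen hd
    have ht' : t < nums.length - 1 := by omega
    have hlist : ((List.range (m+1)).map (fun j : Nat => ((t + j + 1 : Nat) : Int)))
        = ((t + 1 : Nat) : Int) :: ((List.range m).map (fun j : Nat => (((t+1) + j + 1 : Nat) : Int))) := by
      rw [List.range_succ_eq_map, List.map_cons, List.map_map]
      refine congrArg₂ _ (by norm_num) (List.map_congr_left ?_)
      intro j hj
      simp only [Function.comp_apply]
      push_cast
      ring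
    rw [hlist, List.foldl_cons]
    have hpre : PySem.List.pyGetD (nums.scanl (· + ·) 0) ((t + 1 : Nat) : Int) 0
        = (nums.take (t+1)).sum := by
      rw [PySem.List.pyGetD_natCast, lc_scanl_getD nums (t+1) 0 (by omega)]
      ring
    have hkey : (nums.take (t+1)).sum - (nums.sum - (nums.take (t+1)).sum) = lcKeyF nums (t+1) := by
      unfold lcKeyF; ring
    have htake : (lcKeys nums).take (t+1) = (lcKeys nums).take t ++ [lcKeyF nums (t+1)] := by
      rw [List.take_succ_eq_append_getElem (by rw [lc_len_keys]; omega)]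
      rw [lc_getElem_keys nums t ht']
    set d' := d.modify (lcKeyF nums (t+1)) 0 (· + 1) with hd'def
    have hd'2 : ∀ v, d'.getD v 0 = (((lcKeys nums).take (t+1)).count v : Int) := by
      intro v
      rw [hd'def, PySem.Dict.getD_modify, htake, List.count_append]
      by_cases hv : v = lcKeyF nums (t+1)
      · subst hv; simp [hd]
      · rw [if_neg hv, hd v]
        have hz : [lcKeyF nums (t+1)].count v = 0 := by
          simp only [List.count_singleton]
          simp only [beq_iff_eq, ite_eq_right_iff]
          exact fun h => absurd h.symm hv
        rw [hz]
        simp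
    have hmlt : t + 1 < cnt.length := by omega
    have hstep : lc2025Body2 (nums.scanl (· + ·) 0) nums.sum k nums (cnt, d) ((t + 1 : Nat) : Int)
        = (cnt.set (t+1) (cnt.getD (t+1) 0 + (((lcKeys nums).take (t+1)).count (k - nums.getD (t+1) 0) : Int)), d') := by
      simp only [lc2025Body2, hpre, hkey]
      simp only [PySem.List.pySetD_natCast, PySem.List.pyGetD_natCast]
      rw [hd'2]
    rw [hstep]
    set cnt' := cnt.set (t+1) (cnt.getD (t+1) 0 + (((lcKeys nums).take (t+1)).count (k - nums.getD (t+1) 0) : Int)) with hc'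
    have hlen' : cnt'.length = nums.length := by rw [hc', List.length_set, hlen]
    obtain ⟨rl, rg⟩ := ih (t+1) (by omega) cnt' d' hlen' hd'2
    refine ⟨rl, ?_⟩
    intro j hj
    rw [rg j hj]
    by_cases h1 : t + 1 < j
    · rw [if_pos h1, if_pos (by omega : t < j), hc', lc_getD_set _ _ _ _ hmlt,
        if_neg (by omega : ¬ t + 1 = j)]
    · by_cases h2 : j = t + 1
      · subst h2
        rw [if_neg h1, if_pos (by omega : t < t + 1), hc', lc_getD_set _ _ _ _ hmlt, if_pos rfl]
      · rw [if_neg h1, if_neg (by omega : ¬ t < j), hc', lc_getD_set _ _ _ _ hmlt,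
          if_neg (by omega : ¬ t + 1 = j)]

theorem lc_contribsB (nums : List Int) (k : Int) :
    (PySem.List.pyRange 0 (nums.length : Int) 1).map (fun i =>
        (((PySem.List.slice (lcKeys nums) (some i) none).count (PySem.List.pyGetD nums i 0 - k) : Nat) : Int)
      + (((PySem.List.slice (lcKeys nums) none (some i)).count (k - PySem.List.pyGetD nums i 0) : Nat) : Int))
    = (List.range nums.length).map (lcContrib nums k) := by
  rw [PySem.List.pyRange_zero_natCast, List.map_map]
  apply List.map_congr_left
  intro j hj
  simp only [Function.comp_apply, PySem.List.slice_from_natCast, PySem.List.slice_to_natCast,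
    PySem.List.pyGetD_natCast]
  rfl

theorem lc_cntA (nums : List Int) (k : Int) :
    ((PySem.List.pyRange 1 (nums.length : Int) 1).foldl
        (lc2025Body2 (nums.scanl (· + ·) 0) nums.sum k nums)
        ((((PySem.List.pyRange ((nums.length : Int) - 2) (-1) (-1)).foldl
            (lc2025Body1 (nums.scanl (· + ·) 0) nums.sum k nums)
            (List.replicate nums.length 0, PySem.Dict.empty)).1), PySem.Dict.empty)).1
    = (List.range nums.length).map (lcContrib nums k) := by
  rw [lc_range_down, lc_range_up]
  have hdropnil : (lcKeys nums).drop (nums.length - 1) = [] := by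
    apply List.drop_eq_nil_of_le
    rw [lc_len_keys]
  obtain ⟨l1, g1⟩ := lc_loop1 nums k (nums.length - 1) (le_refl _) (List.replicate nums.length 0)
    PySem.Dict.empty (by simp)
    (by intro v; rw [PySem.Dict.getD_empty, hdropnil]; simp)
  obtain ⟨l2, g2⟩ := lc_loop2 nums k (nums.length - 1) 0 (by omega) _ PySem.Dict.empty l1
    (by intro v; rw [PySem.Dict.getD_empty]; simp)
  apply List.ext_getElem
  · rw [l2]; simp
  · intro i hi hi2
    have hin : i < nums.length := by rw [l2] at hi; exact hi
    rw [← List.getD_eq_getElem _ 0 hi, g2 i hin]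
    have hrhs : ((List.range nums.length).map (lcContrib nums k))[i]'hi2 = lcContrib nums k i := by
      simp
    rw [hrhs, g1 i hin]
    unfold lcContrib
    by_cases h0 : 0 < i
    · rw [if_pos h0]
      by_cases hlast : i < nums.length - 1
      · rw [if_pos hlast, List.getD_replicate _ hin]
        ring
      · have : i = nums.length - 1 := by omega
        rw [if_neg hlast, List.getD_replicate _ hin, this, hdropnil]
        simp
    · have h0' : i = 0 := by omega
      subst h0'
      rw [if_neg h0]
      by_cases hlast : 0 < nums.length - 1
      · rw [if_pos hlast, List.getD_replicate _ hin]
        simp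
      · have hz : nums.length - 1 = 0 := by omega
        have hk : lcKeys nums = [] := by unfold lcKeys; rw [hz]; rfl
        rw [if_neg (by omega : ¬ (0:Nat) < nums.length - 1), List.getD_replicate _ hin]
        simp [hk]

-- ===== VERDICT (by name: the statement is the Claim_ definition above) =====
theorem lc_2025_spec : Claim_equal_lc_2025 := by
  intro nums k _ _
  show lc_2025 nums k = lc_2025_alt nums k
  simp only [lc_2025, lc_2025_alt]
  rw [lc_pre_total, lc_ansA, lc_keysB, lc_contribsB, lc_cntA]
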